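-- pv_equiv track=rewrite | github.com/NRB11/Image-processing-and-sensoring | miniproject/MiniprojectV6.py | categorize_hue
-- ===== SOURCE A (Python) =====
-- def categorize_hue(hue_value):
--     # Define Hue ranges for categories
--     hue_ranges = {
--         "Light Green": (45, 90),
--         "Dark Green": (0, 45),
--         "Blue": (90, 150),
--         "Brown": (150, 180),
--     }
--
--     for category, (min_hue, max_hue) in hue_ranges.items():
--         if min_hue <= hue_value < max_hue:
--             return category
--
--     return "Other"
-- ===== SOURCE B (Python) =====
-- def categorize_hue(hue_value):
--     # The four ranges partition [0, 180): check sorted upper bounds only.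
--     if hue_value < 0 or hue_value >= 180:
--         return "Other"
--     if hue_value < 45:
--         return "Dark Green"
--     if hue_value < 90:
--         return "Light Green"
--     if hue_value < 150:
--         return "Blue"
--     return "Brown"
-- ===== Notes on version B (the rewrite author's own statement) =====
-- stated objective: simpler
-- what changed: Replaced the dict of (min,max) ranges scanned pair-by-pair with an ordered upper-bound comparison cascade over the contiguous partition of the hue scale.
import Mathlib
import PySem

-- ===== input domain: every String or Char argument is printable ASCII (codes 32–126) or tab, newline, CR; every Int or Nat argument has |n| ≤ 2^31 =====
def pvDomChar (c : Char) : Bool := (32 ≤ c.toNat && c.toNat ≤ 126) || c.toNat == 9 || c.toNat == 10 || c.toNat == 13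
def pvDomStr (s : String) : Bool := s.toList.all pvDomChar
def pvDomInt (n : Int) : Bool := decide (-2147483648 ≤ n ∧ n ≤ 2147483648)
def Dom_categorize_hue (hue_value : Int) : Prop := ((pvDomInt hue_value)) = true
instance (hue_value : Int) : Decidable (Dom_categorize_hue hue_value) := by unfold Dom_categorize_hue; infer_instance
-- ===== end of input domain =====

-- ===== PORT A =====
-- dict literal becomes an ordered list of (category, (min,max)); loop = first match
def hueRanges : List (String × (Int × Int)) :=
  [("Light Green", (45, 90)), ("Dark Green", (0, 45)), ("Blue", (90, 150)), ("Brown", (150, 180))]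

def hueLoop (hue_value : Int) : List (String × (Int × Int)) → String
  | [] => "Other"
  | (category, (min_hue, max_hue)) :: rest =>
    if min_hue ≤ hue_value ∧ hue_value < max_hue then category
    else hueLoop hue_value rest

def categorize_hue (hue_value : Int) : String := hueLoop hue_value hueRanges

-- ===== PORT B =====
-- B changes: upper-bound comparison cascade over the sorted partition of [0,180), instead of scanning a table of (min,max) pairs (simpler).
def categorize_hue_alt (hue_value : Int) : String :=
  if hue_value < 0 ∨ hue_value ≥ 180 then "Other"
  else if hue_value < 45 then "Dark Green"
  else if hue_value < 90 then "Light Green"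
  else if hue_value < 150 then "Blue"
  else "Brown"

-- ===== PRECONDITION & SPEC =====
def Spec_categorize_hue (hue_value : Int) (out : String) : Prop := out = categorize_hue_alt hue_value
instance (hue_value : Int) (out : String) : Decidable (Spec_categorize_hue hue_value out) := by unfold Spec_categorize_hue; infer_instance

-- ===== CLAIM (what is proved, stated in full; the proofs are below) =====
def Claim_equal_categorize_hue : Prop := ∀ (hue_value : Int), Dom_categorize_hue hue_value → Spec_categorize_hue hue_value (categorize_hue hue_value)

-- ===== LEMMAS AND PROOFS =====

-- ===== VERDICT (by name: the statement is the Claim_ definition above) =====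
theorem categorize_hue_spec : Claim_equal_categorize_hue := by
  intro hue_value _
  simp only [Spec_categorize_hue, categorize_hue, hueRanges, hueLoop, categorize_hue_alt]
  split_ifs <;> first | rfl | omega
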